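-- pv_equiv track=rewrite | github.com/Farathey/algorithms-for-bioinformatics | project_2/translation.py | transcribe_and_translate
-- ===== SOURCE A (Python) =====
-- def transcribe_and_translate(dna_seq):
--     '''Function which first creates complimenary sequence and than using dictionary from the book "Bioinformatics
--     Algorithms" by M. Rocha and R. G. Ferreira translates it to protein sequence which is being returned at the end
--     Parameters:
--     ----------
--     dna_seq : str
--         DNA sequence in which we are transcribing and translating'''
--
--     # First we make sure that the whole sequence is in
--     seq = dna_seq.upper()
--     # Then we create complimentary sequence - we do not use uracile (U) on puropse (explenation below)
--     complimentary_seq = ""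
--     for i in range(len(seq)):
--         if seq[i] == 'A':
--             complimentary_seq = complimentary_seq + 'T'
--         elif seq[i] == 'T':
--             complimentary_seq = complimentary_seq + 'A'
--         elif seq[i] == 'G':
--             complimentary_seq = complimentary_seq + 'C'
--         else:
--             complimentary_seq = complimentary_seq + 'G'
--
--     # Here is dictionary from the book. As we can see its not our usual RNA - it was left in DNA format
--     # uracile (U) from RNA is replaced with thymine (T) from DNA
--     amino_aacids_dict = {
--         "GCT":"A", "GCC":"A", "GCA":"A", "GCG":"A",
--         "TGT":"C", "TGC":"C",
--         "GAT":"D", "GAC":"D",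
--         "GAA":"E", "GAG":"E",
--         "TTT":"F", "TTC":"F",
--         "GGT":"G", "GGC":"G", "GGA":"G", "GGG":"G",
--         "CAT":"H", "CAC":"H",
--         "ATA":"I", "ATT":"I", "ATC":"I",
--         "AAA":"K", "AAG":"K",
--         "TTA":"L", "TTG":"L", "CTT":"L", "CTC":"L", "CTA":"L", "CTG":"L",
--         "ATG":"M",
--         "AAT":"N", "AAC":"N",
--         "CCT":"P", "CCC":"P", "CCA":"P", "CCG":"P",
--         "CAA":"Q", "CAG":"Q",
--         "CGT":"R", "CGC":"R", "CGA":"R", "CGG":"R", "AGA":"R", "AGG":"R",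
--         "TCT":"S", "TCC":"S", "TCA":"S", "TCG":"S", "AGT":"S", "AGC":"S",
--         "ACT":"T", "ACC":"T", "ACA":"T", "ACG":"T",
--         "GTT":"V", "GTC":"V", "GTA":"V", "GTG":"V",
--         "TGG":"W",
--         "TAT":"Y", "TAC":"Y",
--         "TAA":"_", "TAG":"_", "TGA":"_"}
--
--     # Here we translate our complimentary sequence to protein sequence by grouping it in triads and translateing them
--     # according to our dictionary
--     protein_seq = ""
--     for i in range(0, len(complimentary_seq), 3):
--         codon = complimentary_seq[i : i+3]
--         if codon in amino_aacids_dict: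
--             protein_seq = protein_seq + amino_aacids_dict[codon]
--
--     return protein_seq
-- ===== SOURCE B (Python) =====
-- # 64-char genetic-code table, indexed by 16*i0 + 4*i1 + 4**0*i2 where each base
-- # of the (complemented) codon is encoded A=0, C=1, G=2, T=3.
-- _CODE64 = "KNKNTTTTRSRSIIMIQHQHPPPPRRRRLLLLEDEDAAAAGGGGVVVV_Y_YSSSS_CWCLFLF"
--
--
-- def _idx(ch):
--     # index of the COMPLEMENT of ch in "ACGT": A->T(3), T->A(0), G->C(1), else->G(2)
--     if ch == 'A':
--         return 3
--     if ch == 'T':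
--         return 0
--     if ch == 'G':
--         return 1
--     return 2
--
--
-- def transcribe_and_translate(dna_seq):
--     # One pass, no dictionary and no complement string: each full 3-chunk of
--     # the uppercased input is turned into a base-4 number (already composed
--     # with the complement map) that indexes the flat 64-char code table; the
--     # trailing partial chunk is skipped by the range bound.
--     seq = dna_seq.upper()
--     out = []
--     for i in range(0, len(seq) - 2, 3):
--         out.append(_CODE64[16 * _idx(seq[i]) + 4 * _idx(seq[i + 1]) + _idx(seq[i + 2])])
--     return ''.join(out)
-- ===== Notes on version B (the rewrite author's own statement) =====
-- stated objective: simpler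
-- what changed: B drops both the complement string and the 64-entry codon dictionary: it walks the uppercased input once in steps of 3 and turns each full 3-chunk into a base-4 index (the complement map A->3,T->0,G->1,else->2 composed in) into a flat 64-character code string, so there is no second pass, no dict lookup and no membership guard (the trailing partial chunk is dropped by the range bound).
import Mathlib
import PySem

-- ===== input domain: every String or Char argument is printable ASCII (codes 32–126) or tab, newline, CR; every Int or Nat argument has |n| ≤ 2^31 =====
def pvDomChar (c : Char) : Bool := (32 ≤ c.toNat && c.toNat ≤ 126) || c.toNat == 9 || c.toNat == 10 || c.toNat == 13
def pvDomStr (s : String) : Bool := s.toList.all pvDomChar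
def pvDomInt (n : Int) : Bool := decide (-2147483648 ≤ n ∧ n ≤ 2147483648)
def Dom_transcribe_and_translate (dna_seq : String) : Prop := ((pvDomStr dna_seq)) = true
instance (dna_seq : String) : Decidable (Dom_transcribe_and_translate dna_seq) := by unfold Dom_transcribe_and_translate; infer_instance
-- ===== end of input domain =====

-- B replaces A's two passes and 64-entry dict by one pass that turns each full
-- 3-chunk into a base-4 index (complement composed in) into a flat 64-char
-- code table; objective: simpler, same return value.

-- ===== PORT A =====
-- the codon dictionary of the Python A
def aaDict : PySem.Dict String String := PySem.Dict.ofList [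
  ("GCT","A"), ("GCC","A"), ("GCA","A"), ("GCG","A"),
  ("TGT","C"), ("TGC","C"),
  ("GAT","D"), ("GAC","D"),
  ("GAA","E"), ("GAG","E"),
  ("TTT","F"), ("TTC","F"),
  ("GGT","G"), ("GGC","G"), ("GGA","G"), ("GGG","G"),
  ("CAT","H"), ("CAC","H"),
  ("ATA","I"), ("ATT","I"), ("ATC","I"),
  ("AAA","K"), ("AAG","K"),
  ("TTA","L"), ("TTG","L"), ("CTT","L"), ("CTC","L"), ("CTA","L"), ("CTG","L"),
  ("ATG","M"),
  ("AAT","N"), ("AAC","N"),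
  ("CCT","P"), ("CCC","P"), ("CCA","P"), ("CCG","P"),
  ("CAA","Q"), ("CAG","Q"),
  ("CGT","R"), ("CGC","R"), ("CGA","R"), ("CGG","R"), ("AGA","R"), ("AGG","R"),
  ("TCT","S"), ("TCC","S"), ("TCA","S"), ("TCG","S"), ("AGT","S"), ("AGC","S"),
  ("ACT","T"), ("ACC","T"), ("ACA","T"), ("ACG","T"),
  ("GTT","V"), ("GTC","V"), ("GTA","V"), ("GTG","V"),
  ("TGG","W"),
  ("TAT","Y"), ("TAC","Y"),
  ("TAA","_"), ("TAG","_"), ("TGA","_")]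

-- strings are handled on the List Char side (PySem.Chars) and re-packed with
-- String.mk at the end; each loop is the foldl of its Python 'for'
def transcribe_and_translate (dna_seq : String) : String :=
  let seq : List Char := (PySem.Str.upper dna_seq).toList
  let complimentary_seq : List Char :=
    (PySem.List.pyRange 0 (PySem.List.len seq) 1).foldl
      (fun acc i =>
        let c := PySem.List.pyGetD seq i ' '
        if c = 'A' then acc ++ ['T']
        else if c = 'T' then acc ++ ['A']
        else if c = 'G' then acc ++ ['C']
        else acc ++ ['G']) []
  let protein_seq : List Char :=
    (PySem.List.pyRange 0 (PySem.List.len complimentary_seq) 3).foldl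
      (fun acc i =>
        let codon := String.mk (PySem.List.slice complimentary_seq (some i) (some (i + 3)))
        if aaDict.contains codon then acc ++ (aaDict.getD codon "").toList else acc) []
  String.mk protein_seq

-- ===== PORT B =====
-- B's flat 64-char genetic-code table, indexed 16*i0 + 4*i1 + i2 with the
-- complemented bases encoded A=0, C=1, G=2, T=3
def code64 : List Char :=
  "KNKNTTTTRSRSIIMIQHQHPPPPRRRRLLLLEDEDAAAAGGGGVVVV_Y_YSSSS_CWCLFLF".toList

-- '_idx': the position of ch's complement in "ACGT" (A->3, T->0, G->1, else->2)
def bIdx (ch : Char) : Nat :=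
  if ch = 'A' then 3 else if ch = 'T' then 0 else if ch = 'G' then 1 else 2

-- Source B's 'range(0, len-2, 3)' loop over full chunks, as the structural
-- recursion consuming three chars at a time (the trailing partial chunk falls
-- into the '_' case); 'CODE64[k]' with k < 64 always is List.getD
def altChunks : List Char → List Char
  | a :: b :: c :: rest =>
      code64.getD (16 * bIdx a + 4 * bIdx b + bIdx c) '?' :: altChunks rest
  | _ => []

def transcribe_and_translate_alt (dna_seq : String) : String :=
  String.mk (altChunks (PySem.Str.upper dna_seq).toList)

-- ===== PRECONDITION & SPEC =====
def Spec_transcribe_and_translate (dna_seq : String) (out : String) : Prop := out = transcribe_and_translate_alt dna_seq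
instance (dna_seq : String) (out : String) : Decidable (Spec_transcribe_and_translate dna_seq out) := by unfold Spec_transcribe_and_translate; infer_instance

-- ===== CLAIM (what is proved, stated in full; the proofs are below) =====
def Claim_equal_transcribe_and_translate : Prop := ∀ (dna_seq : String), Dom_transcribe_and_translate dna_seq → Spec_transcribe_and_translate dna_seq (transcribe_and_translate dna_seq)

-- ===== LEMMAS AND PROOFS =====

-- A's per-character complement (the if-chain of its first loop)
def aComp (c : Char) : Char :=
  if c = 'A' then 'T' else if c = 'T' then 'A' else if c = 'G' then 'C' else 'G'

-- the translation of an already-complemented sequence, chunk by chunk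
def trChunks : List Char → List Char
  | a :: b :: c :: rest =>
      (aaDict.getD (String.mk [a, b, c]) "").toList ++ trChunks rest
  | _ => []

lemma aComp_good (c : Char) : aComp c = 'T' ∨ aComp c = 'A' ∨ aComp c = 'C' ∨ aComp c = 'G' := by
  unfold aComp; split_ifs <;> simp

-- bIdx and aComp make the same four-way distinction
lemma bIdx_aComp (x : Char) :
    (bIdx x = 3 ∧ aComp x = 'T') ∨ (bIdx x = 0 ∧ aComp x = 'A') ∨
    (bIdx x = 1 ∧ aComp x = 'C') ∨ (bIdx x = 2 ∧ aComp x = 'G') := by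
  unfold bIdx aComp; split_ifs <;> simp

-- B's table lookup agrees with A's dict lookup on the complemented codon
set_option maxRecDepth 8192 in
lemma chunk_eq (a b c : Char) :
    [code64.getD (16 * bIdx a + 4 * bIdx b + bIdx c) '?']
      = (aaDict.getD (String.mk [aComp a, aComp b, aComp c]) "").toList := by
  rcases bIdx_aComp a with ⟨h1, h2⟩ | ⟨h1, h2⟩ | ⟨h1, h2⟩ | ⟨h1, h2⟩ <;>
    rcases bIdx_aComp b with ⟨h3, h4⟩ | ⟨h3, h4⟩ | ⟨h3, h4⟩ | ⟨h3, h4⟩ <;>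
      rcases bIdx_aComp c with ⟨h5, h6⟩ | ⟨h5, h6⟩ | ⟨h5, h6⟩ | ⟨h5, h6⟩ <;>
        rw [h1, h2, h3, h4, h5, h6] <;> decide

lemma altChunks_eq_trChunks (l : List Char) :
    altChunks l = trChunks (l.map aComp) := by
  match l with
  | [] => rfl
  | [a] => rfl
  | [a, b] => rfl
  | a :: b :: c :: rest =>
      show code64.getD _ '?' :: altChunks rest = _
      rw [altChunks_eq_trChunks rest]
      simp only [List.map, trChunks]
      rw [← chunk_eq a b c]
      rfl

set_option maxRecDepth 8192 in
lemma contains_codon (x y z : Char)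
    (hx : x = 'T' ∨ x = 'A' ∨ x = 'C' ∨ x = 'G')
    (hy : y = 'T' ∨ y = 'A' ∨ y = 'C' ∨ y = 'G')
    (hz : z = 'T' ∨ z = 'A' ∨ z = 'C' ∨ z = 'G') :
    aaDict.contains (String.mk [x, y, z]) = true := by
  rcases hx with rfl | rfl | rfl | rfl <;> rcases hy with rfl | rfl | rfl | rfl <;>
    rcases hz with rfl | rfl | rfl | rfl <;> decide

-- step-3 range peeling: range(0, n, 3) = [0] ++ (3 + range(0, n-3, 3))
lemma pyRange3_cons (n : Int) (h : 0 < n) :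
    PySem.List.pyRange 0 n 3 = 0 :: (PySem.List.pyRange 0 (n - 3) 3).map (· + 3) := by
  rw [PySem.List.pyRange_of_pos _ _ (by norm_num), PySem.List.pyRange_of_pos _ _ (by norm_num),
      if_pos h]
  by_cases h3 : (0:Int) < n - 3
  · rw [if_pos h3]
    have hc : ((n - 0 + 3 - 1) / 3).toNat = ((n - 3 - 0 + 3 - 1) / 3).toNat + 1 := by omega
    rw [hc, List.range_succ_eq_map]
    simp only [List.map_cons, List.map_map, List.cons.injEq]
    refine ⟨by norm_num, List.map_congr_left fun k _ => ?_⟩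
    simp [Function.comp]; ring
  · rw [if_neg h3]
    have hc : ((n - 0 + 3 - 1) / 3).toNat = 1 := by omega
    rw [hc]
    simp

-- the body of A's second loop, as a named function of the sequence it scans
def aStep (M : List Char) (acc : List Char) (i : Int) : List Char :=
  let codon := String.mk (PySem.List.slice M (some i) (some (i + 3)))
  if aaDict.contains codon then acc ++ (aaDict.getD codon "").toList else acc

lemma aStep_shift (x y z : Char) (M : List Char) (acc : List Char) (i : Int) (hi : 0 ≤ i) :
    aStep (x :: y :: z :: M) acc (i + 3) = aStep M acc i := by
  have h1 : PySem.List.slice (x :: y :: z :: M) (some (i + 3)) (some (i + 3 + 3))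
      = PySem.List.slice M (some i) (some (i + 3)) := by
    rw [PySem.List.slice_toNat _ (by omega) (by omega),
        PySem.List.slice_toNat _ hi (by omega)]
    have e1 : (i + 3).toNat = i.toNat + 3 := by omega
    have e2 : (i + 3 + 3).toNat = i.toNat + 3 + 3 := by omega
    simp [e1, e2]
  simp only [aStep, h1]

-- A's second loop over an all-{T,A,C,G} sequence is trChunks
set_option maxRecDepth 8192 in
lemma loopA_eq_trChunks (M : List Char)
    (good : ∀ c ∈ M, c = 'T' ∨ c = 'A' ∨ c = 'C' ∨ c = 'G') :
    ∀ acc, (PySem.List.pyRange 0 (M.length : Int) 3).foldl (aStep M) acc = acc ++ trChunks M := by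
  match M with
  | [] => intro acc; simp [trChunks, PySem.List.pyRange]
  | [a] =>
      intro acc
      have hr : PySem.List.pyRange 0 (1 : Int) 3 = [0] := by decide
      have hs : PySem.List.slice [a] (some 0) (some 3) = [a] := by
        rw [PySem.List.slice_toNat _ (by omega) (by omega)]; simp
      have hc : aaDict.contains (String.mk [a]) = false := by
        rcases good a (by simp) with rfl | rfl | rfl | rfl <;> decide
      simp [hr, aStep, hs, hc, trChunks]
  | [a, b] =>
      intro acc
      have hr : PySem.List.pyRange 0 (2 : Int) 3 = [0] := by decide
      have hs : PySem.List.slice [a, b] (some 0) (some 3) = [a, b] := by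
        rw [PySem.List.slice_toNat _ (by omega) (by omega)]; simp
      have hc : aaDict.contains (String.mk [a, b]) = false := by
        rcases good a (by simp) with rfl | rfl | rfl | rfl <;>
          rcases good b (by simp) with rfl | rfl | rfl | rfl <;> decide
      simp [hr, aStep, hs, hc, trChunks]
  | x :: y :: z :: rest =>
      intro acc
      have hlen : ((x :: y :: z :: rest).length : Int) = (rest.length : Int) + 3 := by
        simp; ring
      rw [hlen, pyRange3_cons _ (by positivity)]
      simp only [add_sub_cancel_right, List.foldl_cons, List.foldl_map]
      have h0 : aStep (x :: y :: z :: rest) acc 0 = acc ++ (aaDict.getD (String.mk [x, y, z]) "").toList := by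
        have hs : PySem.List.slice (x :: y :: z :: rest) (some 0) (some 3) = [x, y, z] := by
          rw [PySem.List.slice_toNat _ (by omega) (by omega)]; simp
        simp [aStep, hs, contains_codon x y z (good x (by simp)) (good y (by simp)) (good z (by simp))]
      rw [h0]
      have hcongr : (PySem.List.pyRange 0 (rest.length : Int) 3).foldl
            (fun acc' i => aStep (x :: y :: z :: rest) acc' (i + 3))
            (acc ++ (aaDict.getD (String.mk [x, y, z]) "").toList)
          = (PySem.List.pyRange 0 (rest.length : Int) 3).foldl (aStep rest)
            (acc ++ (aaDict.getD (String.mk [x, y, z]) "").toList) := by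
        apply PySem.List.foldl_congr_mem
        intro acc' i hi
        have := (PySem.List.mem_pyRange_iff_of_pos (by norm_num) i).mp hi
        exact aStep_shift x y z rest acc' i this.1
      rw [hcongr, loopA_eq_trChunks rest (fun c hc => good c (by simp [hc]))]
      simp [trChunks]

-- A's first loop is char-wise complement
lemma loopA1_eq_map (seq : List Char) :
    (PySem.List.pyRange 0 (PySem.List.len seq) 1).foldl
      (fun acc i =>
        let c := PySem.List.pyGetD seq i ' '
        if c = 'A' then acc ++ ['T']
        else if c = 'T' then acc ++ ['A']
        else if c = 'G' then acc ++ ['C']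
        else acc ++ ['G']) [] = seq.map aComp := by
  rw [PySem.List.foldl_pyRange_zero_pyGetD seq ' '
      (fun acc c => if c = 'A' then acc ++ ['T'] else if c = 'T' then acc ++ ['A']
        else if c = 'G' then acc ++ ['C'] else acc ++ ['G']) []]
  have : ∀ acc : List Char, ∀ c ∈ seq,
      (if c = 'A' then acc ++ ['T'] else if c = 'T' then acc ++ ['A']
        else if c = 'G' then acc ++ ['C'] else acc ++ ['G']) = acc ++ [aComp c] := by
    intro acc c _; unfold aComp; split_ifs <;> rfl
  rw [PySem.List.foldl_congr_mem _ _ _ _ this,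
      PySem.List.foldl_append_singleton_eq_map aComp seq []]
  simp

-- ===== VERDICT (by name: the statement is the Claim_ definition above) =====
set_option maxHeartbeats 2000000 in
theorem transcribe_and_translate_spec : Claim_equal_transcribe_and_translate := by
  intro dna_seq _
  unfold Spec_transcribe_and_translate transcribe_and_translate transcribe_and_translate_alt
  simp only [loopA1_eq_map]
  have good : ∀ c ∈ ((PySem.Str.upper dna_seq).toList).map aComp,
      c = 'T' ∨ c = 'A' ∨ c = 'C' ∨ c = 'G' := by
    intro c hc
    obtain ⟨d, _, rfl⟩ := List.mem_map.mp hc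
    exact aComp_good d
  simp only [PySem.List.len_eq]
  rw [altChunks_eq_trChunks]
  congr 1
  exact (loopA_eq_trChunks _ good []).trans (List.nil_append _)
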